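-- pv_equiv track=rewrite | github.com/fa-python-network/7_Symmetric_ciphers | mine.py | cezar_hac
-- ===== SOURCE A (Python) =====
-- def cezar_hac(m):
--     max_char_ = 0
--     key = 0
--     for i in range(65536):
--         prob = len(m.split(chr((32 + i) % 65536)))
--         if prob > max_char_:
--             max_char_ = prob
--             key = i
--     return key
-- ===== SOURCE B (Python) =====
-- def cezar_hac(m):
--     cnt = {}
--     for ch in m:
--         cnt[ch] = cnt.get(ch, 0) + 1
--     best_count = 0
--     key = 0
--     for ch, c in cnt.items():
--         off = (ord(ch) - 32) % 65536
--         if c > best_count or (c == best_count and off < key):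
--             best_count = c
--             key = off
--     return key
-- ===== Notes on version B (the rewrite author's own statement) =====
-- stated objective: faster
-- what changed: B builds a character-frequency dict in one pass over the string and then selects the best offset by iterating only the distinct characters (max count, ties by smallest offset), eliminating A's 65536 full-string splits and its 65536-step selection loop.
import Mathlib
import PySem

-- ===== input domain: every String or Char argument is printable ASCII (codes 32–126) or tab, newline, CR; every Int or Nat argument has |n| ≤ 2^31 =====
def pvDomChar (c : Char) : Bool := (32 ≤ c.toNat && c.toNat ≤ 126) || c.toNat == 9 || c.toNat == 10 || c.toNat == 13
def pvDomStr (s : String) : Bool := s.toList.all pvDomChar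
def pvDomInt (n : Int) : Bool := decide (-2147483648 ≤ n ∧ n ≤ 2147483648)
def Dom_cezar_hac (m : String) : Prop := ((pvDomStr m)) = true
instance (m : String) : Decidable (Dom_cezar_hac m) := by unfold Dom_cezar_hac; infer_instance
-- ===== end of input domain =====

-- B replaces A's 65536 full-string splits and 65536-step selection loop by one frequency
-- dict built in a single pass and a selection over only the distinct characters
-- (max count, ties broken by smallest offset); faster in a timing run.

-- ===== PORT A =====
-- 'return key' on A's loop state (max_char_, key); a named helper so the final
-- projection stays syntactic on the 65536-element fold
def pvKey (st : Int × Int) : Int := st.2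

def cezar_hac (m : String) : Int :=
  pvKey ((PySem.List.pyRange 0 65536 1).foldl
    (fun (st : Int × Int) (i : Int) =>
      let prob : Int :=
        ((PySem.Chars.splitOn m.toList [Char.ofNat ((PySem.Int.mod (32 + i) 65536).toNat)]).length : Int)
      if prob > st.1 then (prob, i) else st) (0, 0))

-- ===== PORT B =====
-- (ord(ch) - 32) % 65536
def pvOff (c : Char) : Int := PySem.Int.mod ((c.toNat : Int) - 32) 65536

def cezar_hac_alt (m : String) : Int :=
  ((m.toList.foldl
      (fun (d : PySem.Dict Char Int) ch => d.insert ch (d.getD ch 0 + 1))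
      PySem.Dict.empty).items.foldl
    (fun (st : Int × Int) (p : Char × Int) =>
      if p.2 > st.1 ∨ (p.2 = st.1 ∧ pvOff p.1 < st.2) then (p.2, pvOff p.1) else st) (0, 0)).2

-- ===== PRECONDITION & SPEC =====
def Spec_cezar_hac (m : String) (out : Int) : Prop := out = cezar_hac_alt m
instance (m : String) (out : Int) : Decidable (Spec_cezar_hac m out) := by unfold Spec_cezar_hac; infer_instance

-- ===== CLAIM (what is proved, stated in full; the proofs are below) =====
def Claim_equal_cezar_hac : Prop := ∀ (m : String), Dom_cezar_hac m → Spec_cezar_hac m (cezar_hac m)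

-- ===== LEMMAS AND PROOFS =====

-- "strictly better candidate": larger count, or equal count and smaller offset
def pvLtB (p q : Int × Int) : Bool := decide (q.1 < p.1) || (decide (p.1 = q.1) && decide (p.2 < q.2))

-- "at least as good a candidate"
def pvLe (p q : Int × Int) : Prop := q.1 < p.1 ∨ (p.1 = q.1 ∧ p.2 ≤ q.2)

-- the generic selection fold both loops reduce to
def pvSel (st : Int × Int) (l : List (Int × Int)) : Int × Int :=
  l.foldl (fun st p => if pvLtB p st then p else st) st

theorem pvLtB_iff (p q : Int × Int) : pvLtB p q = true ↔ (q.1 < p.1 ∨ (p.1 = q.1 ∧ p.2 < q.2)) := by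
  simp [pvLtB]

theorem pvLe_refl (p : Int × Int) : pvLe p p := Or.inr ⟨rfl, le_refl _⟩

theorem pvLe_trans {p q r : Int × Int} (h1 : pvLe p q) (h2 : pvLe q r) : pvLe p r := by
  rcases h1 with h1 | ⟨h1, h1'⟩ <;> rcases h2 with h2 | ⟨h2, h2'⟩ <;> unfold pvLe <;> omega

theorem pvLe_antisymm {p q : Int × Int} (h1 : pvLe p q) (h2 : pvLe q p) : p = q := by
  rcases p with ⟨a, b⟩; rcases q with ⟨c, d⟩
  rcases h1 with h1 | ⟨h1, h1'⟩ <;> rcases h2 with h2 | ⟨h2, h2'⟩ <;> simp_all <;> omega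

theorem pvSel_mem : ∀ (l : List (Int × Int)) (st : Int × Int), pvSel st l ∈ st :: l := by
  intro l
  induction l with
  | nil => intro st; simp [pvSel]
  | cons p t ih =>
    intro st
    simp only [pvSel, List.foldl_cons]
    by_cases h : pvLtB p st = true
    · rw [if_pos h]
      have := ih p
      simp only [pvSel] at this
      rcases List.mem_cons.mp this with h' | h' <;> simp [h']
    · rw [if_neg h]
      have := ih st
      simp only [pvSel] at this
      rcases List.mem_cons.mp this with h' | h' <;> simp [h']

theorem pvSel_le : ∀ (l : List (Int × Int)) (st x : Int × Int), x ∈ st :: l → pvLe (pvSel st l) x := by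
  intro l
  induction l with
  | nil =>
    intro st x hx
    have hx' : x = st := by simpa using hx
    simp only [pvSel, List.foldl_nil]
    rw [hx']
    exact pvLe_refl st
  | cons p t ih =>
    intro st x hx
    simp only [pvSel, List.foldl_cons]
    by_cases h : pvLtB p st = true
    · rw [if_pos h]
      have hle : pvLe p st := by rw [pvLtB_iff] at h; unfold pvLe; omega
      rcases List.mem_cons.mp hx with hx | hx
      · rw [hx]
        exact pvLe_trans (ih p p (by simp)) hle
      · rcases List.mem_cons.mp hx with hx | hx
        · rw [hx]; exact ih p p (by simp)
        · exact ih p x (List.mem_cons.mpr (Or.inr hx))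
    · rw [if_neg h]
      have h' := (not_congr (pvLtB_iff p st)).mp h
      have hge : pvLe st p := by unfold pvLe; omega
      rcases List.mem_cons.mp hx with hx | hx
      · rw [hx]; exact ih st st (by simp)
      · rcases List.mem_cons.mp hx with hx | hx
        · rw [hx]
          exact pvLe_trans (ih st st (by simp)) hge
        · exact ih st x (List.mem_cons.mpr (Or.inr hx))

-- two candidate lists that dominate each other select the same element
theorem pvSel_eq_of_dom (st1 st2 : Int × Int) (l1 l2 : List (Int × Int))
    (h12 : ∀ x ∈ st1 :: l1, ∃ y ∈ st2 :: l2, pvLe y x)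
    (h21 : ∀ y ∈ st2 :: l2, ∃ x ∈ st1 :: l1, pvLe x y) :
    pvSel st1 l1 = pvSel st2 l2 := by
  obtain ⟨y, hy, hyx⟩ := h12 (pvSel st1 l1) (pvSel_mem l1 st1)
  obtain ⟨x, hx, hxy⟩ := h21 (pvSel st2 l2) (pvSel_mem l2 st2)
  exact pvLe_antisymm
    (pvLe_trans (pvSel_le l1 st1 x hx) hxy)
    (pvLe_trans (pvSel_le l2 st2 y hy) hyx)

-- len(m.split(c)) for a single-character separator is count(c) + 1
theorem splitOn_go_length (c : Char) :
    ∀ (fuel : Nat) (l cur : List Char) (acc : List (List Char)), l.length ≤ fuel →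
      (PySem.Chars.splitOn.go [c] fuel l cur acc).length = acc.length + l.count c + 1 := by
  intro fuel
  induction fuel with
  | zero =>
    intro l cur acc hl
    have : l = [] := by
      cases l with
      | nil => rfl
      | cons a t => simp at hl
    subst this
    simp [PySem.Chars.splitOn.go]
  | succ n ih =>
    intro l cur acc hl
    cases l with
    | nil => simp [PySem.Chars.splitOn.go]
    | cons a t =>
      simp only [PySem.Chars.splitOn.go]
      by_cases h : a = c
      · subst h
        have hpre : [a].isPrefixOf (a :: t) = true := by
          simp [List.isPrefixOf]
        simp only [hpre, if_pos, List.length_cons, List.length_nil, List.drop_succ_cons,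
          List.drop_zero]
        rw [ih t [] ((cur.reverse) :: acc) (by simpa using Nat.le_of_succ_le_succ hl)]
        simp
        omega
      · have hpre : [c].isPrefixOf (a :: t) = false := by
          simp [List.isPrefixOf]
          exact fun hh => h hh.symm
        rw [hpre]
        simp only [Bool.false_eq_true, if_false]
        rw [ih t (a :: cur) acc (by simpa using Nat.le_of_succ_le_succ hl)]
        have : (a :: t).count c = t.count c := by
          simp [List.count_cons]
          exact fun hh => absurd hh h
        omega

theorem length_splitOn_single (s : List Char) (c : Char) :
    (PySem.Chars.splitOn s [c]).length = s.count c + 1 := by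
  unfold PySem.Chars.splitOn
  rw [splitOn_go_length c (s.length + 1) s [] [] (by omega)]
  simp

-- the character A probes at offset i
def pvChi (i : Int) : Char := Char.ofNat ((PySem.Int.mod (32 + i) 65536).toNat)

-- A's loop is the selection fold over the pairs (g i, i), for increasing i
theorem A_fold_as_sel (g : Int → Int) :
    ∀ (l : List Int) (st : Int × Int), l.Pairwise (· < ·) → (∀ i ∈ l, st.2 ≤ i) →
      l.foldl (fun st i => if g i > st.1 then (g i, i) else st) st
        = pvSel st (l.map (fun i => (g i, i))) := by
  intro l
  induction l with
  | nil => intro st _ _; rfl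
  | cons a t ih =>
    intro st hp hle
    have ha : st.2 ≤ a := hle a (by simp)
    have hpt := (List.pairwise_cons.mp hp).2
    have hat := (List.pairwise_cons.mp hp).1
    simp only [List.foldl_cons, List.map_cons, pvSel]
    have hcond : (pvLtB (g a, a) st = true) ↔ (g a > st.1) := by
      rw [pvLtB_iff]
      constructor
      · rintro (h | ⟨_, h⟩) <;> omega
      · intro h; left; omega
    by_cases h : g a > st.1
    · rw [if_pos h, if_pos (hcond.mpr h)]
      exact ih (g a, a) hpt (fun i hi => le_of_lt (hat i hi))
    · rw [if_neg h, if_neg (fun hc => h (hcond.mp hc))]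
      exact ih st hpt (fun i hi => le_trans ha (le_of_lt (hat i hi)))

-- shifting every count by one (and the initial max with it) does not change the selection
theorem pvSel_shift :
    ∀ (l : List (Int × Int)) (st : Int × Int),
      pvSel (st.1 + 1, st.2) (l.map (fun p => (p.1 + 1, p.2))) =
        ((pvSel st l).1 + 1, (pvSel st l).2) := by
  intro l
  induction l with
  | nil => intro st; rfl
  | cons p t ih =>
    intro st
    simp only [List.map_cons, pvSel, List.foldl_cons]
    have heq : pvLtB (p.1 + 1, p.2) (st.1 + 1, st.2) = pvLtB p st := by
      simp only [pvLtB]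
      have h1 : decide ((st.1 + 1, st.2).1 < (p.1 + 1, p.2).1) = decide (st.1 < p.1) := by
        rw [decide_eq_decide]; dsimp only; omega
      have h2 : decide ((p.1 + 1, p.2).1 = (st.1 + 1, st.2).1) = decide (p.1 = st.1) := by
        rw [decide_eq_decide]; dsimp only; omega
      rw [h1, h2]
    by_cases h : pvLtB p st = true
    · rw [heq, if_pos h, if_pos h]
      exact ih p
    · rw [heq, if_neg h, if_neg h]
      exact ih st

-- and therefore neither does it change the selected key
theorem pvSel_shift_key (l : List (Int × Int)) (st : Int × Int) :
    (pvSel (st.1 + 1, st.2) (l.map (fun p => (p.1 + 1, p.2)))).2 = (pvSel st l).2 := by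
  rw [pvSel_shift]

-- B's loop is the selection fold over the pairs (count, offset)
theorem B_fold_as_sel :
    ∀ (l : List (Char × Int)) (st : Int × Int),
      l.foldl (fun (st : Int × Int) (p : Char × Int) =>
          if p.2 > st.1 ∨ (p.2 = st.1 ∧ pvOff p.1 < st.2) then (p.2, pvOff p.1) else st) st
        = pvSel st (l.map (fun p => (p.2, pvOff p.1))) := by
  intro l
  induction l with
  | nil => intro st; rfl
  | cons p t ih =>
    intro st
    simp only [List.foldl_cons, List.map_cons, pvSel]
    have hcond : (pvLtB (p.2, pvOff p.1) st = true) ↔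
        (p.2 > st.1 ∨ (p.2 = st.1 ∧ pvOff p.1 < st.2)) := pvLtB_iff _ _
    by_cases h : p.2 > st.1 ∨ (p.2 = st.1 ∧ pvOff p.1 < st.2)
    · rw [if_pos h, if_pos (hcond.mpr h)]; exact ih (p.2, pvOff p.1)
    · rw [if_neg h, if_neg (fun hc => h (hcond.mp hc))]; exact ih st

-- offset/character round trip: a domain character's offset lies in [0, 65536) and probes back to it
theorem chi_off (c : Char) (hc : pvDomChar c = true) :
    0 ≤ pvOff c ∧ pvOff c < 65536 ∧ pvChi (pvOff c) = c := by
  have hcode : c.toNat = 9 ∨ c.toNat = 10 ∨ c.toNat = 13 ∨ (32 ≤ c.toNat ∧ c.toNat ≤ 126) := by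
    simp [pvDomChar] at hc; omega
  have hm : pvOff c = ((c.toNat : Int) - 32) % 65536 := by
    simp [pvOff]
  have hoff : pvOff c = if 32 ≤ c.toNat then (c.toNat : Int) - 32 else (c.toNat : Int) - 32 + 65536 := by
    rw [hm]; split_ifs with h <;> omega
  refine ⟨by rw [hoff]; split_ifs <;> omega, by rw [hoff]; split_ifs <;> omega, ?_⟩
  have h2 : PySem.Int.mod (32 + pvOff c) 65536 = (c.toNat : Int) := by
    rw [PySem.Int.mod_eq_emod_of_pos (by norm_num : (0:Int) < 65536), hoff]
    split_ifs with h <;> omega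
  simp only [pvChi, h2, Int.toNat_natCast]
  exact Char.ofNat_toNat c

-- a probed character that occurs in the (domain) string probes from exactly its own offset
theorem off_chi (m : String) (hDom : Dom_cezar_hac m) (i : Int) (h0 : 0 ≤ i) (h1 : i < 65536)
    (hmem : pvChi i ∈ m.toList) : pvOff (pvChi i) = i := by
  have hc : pvDomChar (pvChi i) = true := by
    unfold Dom_cezar_hac pvDomStr at hDom
    exact List.all_eq_true.mp hDom _ hmem
  have hcode : (pvChi i).toNat = 9 ∨ (pvChi i).toNat = 10 ∨ (pvChi i).toNat = 13 ∨
      (32 ≤ (pvChi i).toNat ∧ (pvChi i).toNat ≤ 126) := by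
    simp [pvDomChar] at hc; omega
  have hm : PySem.Int.mod (32 + i) 65536 = (32 + i) % 65536 :=
    PySem.Int.mod_eq_emod_of_pos (by norm_num)
  have hb : 0 ≤ (32 + i) % 65536 ∧ (32 + i) % 65536 < 65536 := by omega
  have htn : (pvChi i).toNat = ((32 + i) % 65536).toNat ∨ (pvChi i).toNat = 0 := by
    unfold pvChi
    rw [hm, Char.toNat_ofNat]
    split_ifs <;> simp
  rcases htn with htn | htn
  · have hcast : ((pvChi i).toNat : Int) = (32 + i) % 65536 := by
      rw [htn, Int.toNat_of_nonneg hb.1]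
    rw [pvOff, PySem.Int.mod_eq_emod_of_pos (by norm_num : (0:Int) < 65536), hcast]
    omega
  · omega

-- ===== VERDICT (by name: the statement is the Claim_ definition above) =====
theorem cezar_hac_spec : Claim_equal_cezar_hac := by
  intro m hDom
  unfold Spec_cezar_hac cezar_hac cezar_hac_alt
  rw [pvKey]
  -- A's loop counts through splits; rewrite its test value to count + 1
  have hA1 : (PySem.List.pyRange 0 65536 1).foldl
      (fun (st : Int × Int) (i : Int) =>
        let prob : Int :=
          ((PySem.Chars.splitOn m.toList [Char.ofNat ((PySem.Int.mod (32 + i) 65536).toNat)]).length : Int)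
        if prob > st.1 then (prob, i) else st) (0, 0)
      = (PySem.List.pyRange 0 65536 1).foldl
        (fun (st : Int × Int) (i : Int) =>
          if ((m.toList.count (pvChi i) : Int) + 1) > st.1
          then (((m.toList.count (pvChi i) : Int) + 1), i) else st) (0, 0) := by
    apply PySem.List.foldl_congr_mem
    intro acc x _
    have hv : ((PySem.Chars.splitOn m.toList [Char.ofNat ((PySem.Int.mod (32 + x) 65536).toNat)]).length : Int)
        = ((m.toList.count (pvChi x) : Int) + 1) := by
      rw [show Char.ofNat ((PySem.Int.mod (32 + x) 65536).toNat) = pvChi x from rfl,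
        length_splitOn_single]
      push_cast; ring
    show (if ((PySem.Chars.splitOn m.toList [Char.ofNat ((PySem.Int.mod (32 + x) 65536).toNat)]).length : Int) > acc.1
      then (((PySem.Chars.splitOn m.toList [Char.ofNat ((PySem.Int.mod (32 + x) 65536).toNat)]).length : Int), x)
      else acc) = _
    rw [hv]
  -- A's loop as the selection fold
  have hA2 := A_fold_as_sel (fun i => ((m.toList.count (pvChi i) : Int) + 1))
      (PySem.List.pyRange 0 65536 1) (0, 0)
      (PySem.List.pairwise_lt_pyRange_one 0 65536)
      (fun i hi => by
        show (0 : Int) ≤ i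
        have := (PySem.List.mem_pyRange_one).mp hi
        exact this.1)
  dsimp only at hA2
  -- shift A's pairs (count+1, i) down to (count, i)
  have hshift : ((PySem.List.pyRange 0 65536 1).map
        (fun i => ((m.toList.count (pvChi i) : Int) + 1, i)))
      = ((PySem.List.pyRange 0 65536 1).map
          (fun i => ((m.toList.count (pvChi i) : Int), i))).map (fun p => (p.1 + 1, p.2)) := by
    rw [List.map_map]
    exact List.map_congr_left (fun i _ => rfl)
  have hk := pvSel_shift_key ((PySem.List.pyRange 0 65536 1).map
      (fun i => ((m.toList.count (pvChi i) : Int), i))) (-1, 0)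
  norm_num at hk
  -- the two candidate lists dominate each other, so the selections coincide
  have hsel : pvSel (-1, 0)
        ((PySem.List.pyRange 0 65536 1).map (fun i => ((m.toList.count (pvChi i) : Int), i)))
      = pvSel (0, 0)
        (((PySem.Dict.counter m.toList).items).map (fun p => (p.2, pvOff p.1))) := by
    rw [PySem.Dict.items_counter, List.map_map]
    apply pvSel_eq_of_dom
    · -- every A candidate is matched or beaten by a B candidate
      intro x hx
      rcases List.mem_cons.mp hx with hx | hx
      · exact ⟨(0, 0), by simp, by rw [hx]; left; norm_num⟩
      · obtain ⟨i, hi, rfl⟩ := List.mem_map.mp hx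
        obtain ⟨hi0, hi1⟩ := (PySem.List.mem_pyRange_one).mp hi
        by_cases hz : m.toList.count (pvChi i) = 0
        · exact ⟨(0, 0), by simp, Or.inr ⟨by simp [hz], by simpa using hi0⟩⟩
        · have hmem : pvChi i ∈ m.toList := List.count_pos_iff.mp (Nat.pos_of_ne_zero hz)
          have hcm : pvChi i ∈ PySem.Set.ofList m.toList := by
            rw [PySem.Set.mem_ofList _ _]; exact hmem
          refine ⟨((m.toList.count (pvChi i) : Int), pvOff (pvChi i)), ?_, ?_⟩
          · exact List.mem_cons.mpr (Or.inr (List.mem_map.mpr ⟨pvChi i, hcm, rfl⟩))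
          · rw [off_chi m hDom i hi0 hi1 hmem]
            exact pvLe_refl _
    · -- every B candidate is matched or beaten by an A candidate
      intro y hy
      rcases List.mem_cons.mp hy with hy | hy
      · refine ⟨((m.toList.count (pvChi 0) : Int), 0), ?_, ?_⟩
        · exact List.mem_cons.mpr (Or.inr (List.mem_map.mpr
            ⟨0, (PySem.List.mem_pyRange_one).mpr ⟨le_refl _, by norm_num⟩, rfl⟩))
        · rw [hy]
          rcases Nat.eq_zero_or_pos (m.toList.count (pvChi 0)) with h | h
          · exact Or.inr ⟨by simp [h], le_refl _⟩
          · left; dsimp only; exact_mod_cast h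
      · obtain ⟨c, hc, rfl⟩ := List.mem_map.mp hy
        have hmem : c ∈ m.toList := (PySem.Set.mem_ofList _ _).mp hc
        have hdc : pvDomChar c = true := by
          unfold Dom_cezar_hac pvDomStr at hDom
          exact List.all_eq_true.mp hDom _ hmem
        obtain ⟨ho0, ho1, hchi⟩ := chi_off c hdc
        refine ⟨((m.toList.count (pvChi (pvOff c)) : Int), pvOff c), ?_, ?_⟩
        · exact List.mem_cons.mpr (Or.inr (List.mem_map.mpr
            ⟨pvOff c, (PySem.List.mem_pyRange_one).mpr ⟨ho0, ho1⟩, rfl⟩))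
        · dsimp only
          rw [hchi]
          exact pvLe_refl _
  rw [← List.map_map] at hk
  rw [hA1, hA2, hshift, hk]
  rw [PySem.Dict.foldl_insert_getD_add_one_eq_counter, B_fold_as_sel, hsel]
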